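-- pv_equiv track=rewrite | github.com/ProgrammerXX1/AFM | layer-Back/app/ml/batching.py | plan_pass1
-- ===== SOURCE A (Python) =====
-- from typing import Dict, List, Any, Set, Tuple
--
-- def plan_pass1(docs_map: Dict[str, List[Dict[str, Any]]], per_doc_cap: int) -> Dict[str, List[int]]:
--     plan: Dict[str, List[int]] = {}
--     for doc_id, chunks in docs_map.items():
--         acc, toks = [], 0
--         for ch in chunks:
--             if toks + ch["n_tokens"] > per_doc_cap:
--                 break
--             acc.append(ch["chunk_id"]); toks += ch["n_tokens"]
--         plan[doc_id] = acc
--     return plan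
-- ===== SOURCE B (Python) =====
-- def plan_pass1(docs_map, per_doc_cap):
--     def prefix_keep(chunks):
--         sums, t = [], 0
--         for ch in chunks:
--             t += ch.get("n_tokens", 0)
--             sums.append(t)
--         k = next((i for i, s in enumerate(sums) if s > per_doc_cap), len(sums))
--         return [ch["chunk_id"] for ch in chunks[:k]]
--     return {doc_id: prefix_keep(chunks) for doc_id, chunks in docs_map.items()}
-- ===== Notes on version B (the rewrite author's own statement) =====
-- stated objective: alternative
-- what changed: Replaces the running-sum-with-break loop by a prefix-sum table followed by finding the first index whose cumulative total exceeds the cap and slicing/mapping the chunk ids, with the per-doc work factored into a helper used by a dict comprehension. Pre_ excludes exactly the inputs where a chunk A reads lacks 'n_tokens'/'chunk_id' (A raises KeyError) and assoc-list chunks with duplicate keys, which a Python dict argument cannot carry.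
import Mathlib
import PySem

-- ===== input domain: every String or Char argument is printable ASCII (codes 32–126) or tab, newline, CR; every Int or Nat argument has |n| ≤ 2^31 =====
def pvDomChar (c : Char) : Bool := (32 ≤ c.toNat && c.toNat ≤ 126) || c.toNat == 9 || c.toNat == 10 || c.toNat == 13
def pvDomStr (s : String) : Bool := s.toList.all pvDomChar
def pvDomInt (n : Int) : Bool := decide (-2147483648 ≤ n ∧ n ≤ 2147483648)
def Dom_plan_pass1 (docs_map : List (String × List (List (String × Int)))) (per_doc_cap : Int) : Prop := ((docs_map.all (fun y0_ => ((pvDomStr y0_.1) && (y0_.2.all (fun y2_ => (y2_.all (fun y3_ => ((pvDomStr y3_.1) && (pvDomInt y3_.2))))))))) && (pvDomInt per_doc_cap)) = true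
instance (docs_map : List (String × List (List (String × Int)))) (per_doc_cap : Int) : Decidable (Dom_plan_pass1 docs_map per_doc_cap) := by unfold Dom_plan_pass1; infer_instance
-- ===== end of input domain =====

-- B replaces A's running-sum-with-break loop by a prefix-sum table, a first-exceed
-- index search, and a slice-and-map of chunk ids (objective: alternative decomposition).

-- ===== PORT A =====
-- inner for-loop of A: acc/toks loop state, 'break' = return acc.
-- getD … 0 is exact under Pre_ (keys present); Python raises KeyError otherwise, excluded by Pre_.
def planInnerA (cap : Int) (chunks : List (List (String × Int))) (acc : List Int) (toks : Int) : List Int :=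
  match chunks with
  | [] => acc
  | ch :: rest =>
    let n := (PySem.Dict.mk ch).getD "n_tokens" 0
    if toks + n > cap then acc
    else planInnerA cap rest (acc ++ [(PySem.Dict.mk ch).getD "chunk_id" 0]) (toks + n)

def plan_pass1 (docs_map : List (String × List (List (String × Int)))) (per_doc_cap : Int) : List (String × List Int) :=
  (docs_map.foldl
    (fun (plan : PySem.Dict String (List Int)) p =>
      plan.insert p.1 (planInnerA per_doc_cap p.2 [] 0))
    PySem.Dict.empty).items

-- ===== PORT B =====
-- per-doc helper of B: prefix sums, first index exceeding the cap, slice + map.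
def prefixKeep (cap : Int) (chunks : List (List (String × Int))) : List Int :=
  let sums := (chunks.foldl
      (fun (st : List Int × Int) ch =>
        let t := st.2 + (PySem.Dict.mk ch).getD "n_tokens" 0
        (st.1 ++ [t], t)) ([], 0)).1
  let k := (sums.findIdx? (fun s => cap < s)).getD sums.length
  (chunks.take k).map (fun ch => (PySem.Dict.mk ch).getD "chunk_id" 0)

def plan_pass1_alt (docs_map : List (String × List (List (String × Int)))) (per_doc_cap : Int) : List (String × List Int) :=
  (docs_map.foldl
    (fun (plan : PySem.Dict String (List Int)) p =>
      plan.insert p.1 (prefixKeep per_doc_cap p.2))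
    PySem.Dict.empty).items

-- ===== PRECONDITION & SPEC =====
-- total of the 'n_tokens' values of the first k chunks (closed-form on the input)
def chunkPrefTok (chunks : List (List (String × Int))) (k : Nat) : Int :=
  ((chunks.take k).map (fun ch => (PySem.Dict.mk ch).getD "n_tokens" 0)).sum
-- Pre_ excludes inputs where a chunk dict A reads lacks the 'n_tokens'/'chunk_id' key (A raises
-- KeyError there) and assoc-list chunks with duplicate keys, which a Python dict argument cannot carry.
def Pre_plan_pass1 (docs_map : List (String × List (List (String × Int)))) (per_doc_cap : Int) : Prop :=
  ∀ p ∈ docs_map,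
    (∀ ch ∈ p.2, (ch.map Prod.fst).Nodup) ∧
    ∀ i < p.2.length,
      ((∀ j < i, chunkPrefTok p.2 (j + 1) ≤ per_doc_cap) →
        "n_tokens" ∈ (p.2.getD i []).map Prod.fst) ∧
      ((∀ j < i + 1, chunkPrefTok p.2 (j + 1) ≤ per_doc_cap) →
        "chunk_id" ∈ (p.2.getD i []).map Prod.fst)
instance (docs_map : List (String × List (List (String × Int)))) (per_doc_cap : Int) : Decidable (Pre_plan_pass1 docs_map per_doc_cap) := by unfold Pre_plan_pass1; infer_instance

def pvWitness_plan_pass1 : (List (String × List (List (String × Int)))) × Int :=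
  ([("d", [[("n_tokens", 2), ("chunk_id", 0)], [("n_tokens", 3), ("chunk_id", 1)], [("n_tokens", 4), ("chunk_id", 2)]])], 5)

def Spec_plan_pass1 (docs_map : List (String × List (List (String × Int)))) (per_doc_cap : Int) (out : List (String × List Int)) : Prop := out = plan_pass1_alt docs_map per_doc_cap
instance (docs_map : List (String × List (List (String × Int)))) (per_doc_cap : Int) (out : List (String × List Int)) : Decidable (Spec_plan_pass1 docs_map per_doc_cap out) := by unfold Spec_plan_pass1; infer_instance

-- ===== CLAIM (what is proved, stated in full; the proofs are below) =====
def Claim_equal_plan_pass1 : Prop := ∀ (docs_map : List (String × List (List (String × Int)))) (per_doc_cap : Int), Dom_plan_pass1 docs_map per_doc_cap → Pre_plan_pass1 docs_map per_doc_cap → Spec_plan_pass1 docs_map per_doc_cap (plan_pass1 docs_map per_doc_cap)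

-- ===== LEMMAS AND PROOFS =====

-- recursive characterisation of B's prefix-sum list
def specSums (t0 : Int) : List (List (String × Int)) → List Int
  | [] => []
  | ch :: rest =>
    let t := t0 + (PySem.Dict.mk ch).getD "n_tokens" 0
    t :: specSums t rest

theorem specSums_length (t0 : Int) (l : List (List (String × Int))) :
    (specSums t0 l).length = l.length := by
  induction l generalizing t0 with
  | nil => rfl
  | cons ch rest ih => simp [specSums, ih]

theorem sums_foldl (l : List (List (String × Int))) :
    ∀ (acc : List Int) (t0 : Int),
      (l.foldl (fun (st : List Int × Int) ch =>
        let t := st.2 + (PySem.Dict.mk ch).getD "n_tokens" 0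
        (st.1 ++ [t], t)) (acc, t0)).1 = acc ++ specSums t0 l := by
  induction l with
  | nil => simp [specSums]
  | cons ch rest ih => intro acc t0; simp [specSums, ih, List.append_assoc]

theorem specSums_shift (a : Int) (l : List (List (String × Int))) :
    ∀ t0 : Int, specSums (a + t0) l = (specSums t0 l).map (a + ·) := by
  induction l with
  | nil => intro t0; rfl
  | cons ch rest ih =>
      intro t0
      simp only [specSums]
      rw [add_assoc, ih, List.map_cons]

theorem prefixKeep_cons (cap : Int) (ch : List (String × Int)) (rest : List (List (String × Int))) :
    prefixKeep cap (ch :: rest) =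
      (if cap < (PySem.Dict.mk ch).getD "n_tokens" 0 then []
       else (PySem.Dict.mk ch).getD "chunk_id" 0 :: prefixKeep (cap - (PySem.Dict.mk ch).getD "n_tokens" 0) rest) := by
  unfold prefixKeep
  rw [sums_foldl, sums_foldl]
  simp only [List.nil_append, specSums, zero_add]
  generalize (PySem.Dict.mk ch).getD "n_tokens" 0 = n
  by_cases h : cap < n
  · simp [List.findIdx?_cons, h]
  · have hshift : specSums n rest = (specSums 0 rest).map (n + ·) := by
      have := specSums_shift n rest 0
      simpa using this
    have hp : ((fun s => decide (cap < s)) ∘ (n + ·)) = fun s => decide (cap - n < s) := by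
      funext x; simp only [Function.comp_apply]
      rw [decide_eq_decide]; omega
    have hfind : (specSums n rest).findIdx? (fun s => cap < s)
        = (specSums 0 rest).findIdx? (fun s => cap - n < s) := by
      rw [hshift, List.findIdx?_map, hp]
    simp only [List.findIdx?_cons, decide_eq_true_eq]
    rw [if_neg h, hfind]
    cases hf : (specSums 0 rest).findIdx? (fun s => cap - n < s) with
    | none =>
        simp [Option.getD, specSums_length, List.take_succ_cons, h]
    | some i =>
        simp [Option.getD, List.take_succ_cons, h]

theorem innerA_eq (cap : Int) (chunks : List (List (String × Int))) :
    ∀ (acc : List Int) (toks : Int),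
      planInnerA cap chunks acc toks = acc ++ prefixKeep (cap - toks) chunks := by
  induction chunks with
  | nil =>
      intro acc toks
      simp [planInnerA, prefixKeep]
  | cons ch rest ih =>
      intro acc toks
      rw [planInnerA, prefixKeep_cons]
      generalize hgen : (PySem.Dict.mk ch).getD "n_tokens" 0 = n
      by_cases h : toks + n > cap
      · rw [if_pos h, if_pos (by omega)]; simp
      · rw [if_neg h, if_neg (by omega), ih]
        have : cap - (toks + n) = cap - toks - n := by ring
        rw [this]; simp

-- ===== VERDICT (by name: the statement is the Claim_ definition above) =====
theorem plan_pass1_spec : Claim_equal_plan_pass1 := by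
  intro docs_map per_doc_cap _ _
  unfold Spec_plan_pass1 plan_pass1 plan_pass1_alt
  congr 2
  funext plan p
  rw [innerA_eq]
  simp
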